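-- pv_equiv track=rewrite | github.com/travisjneuman/learn.python | projects/level-5/04-config-layer-priority/project.py | get_config_sources
-- ===== SOURCE A (Python) =====
-- def get_config_sources(
--     resolved: dict, defaults: dict, file_config: dict, env_config: dict,
-- ) -> dict[str, str]:
--     """Track where each config value came from (for debugging)."""
--     sources: dict[str, str] = {}
--     for key in resolved:
--         if key in env_config:
--             sources[key] = "environment"
--         elif key in file_config:
--             sources[key] = "file"
--         elif key in defaults:
--             sources[key] = "default"
--         else:
--             sources[key] = "unknown"
--     return sources
-- ===== SOURCE B (Python) =====
-- def get_config_sources(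
--     resolved: dict, defaults: dict, file_config: dict, env_config: dict,
-- ) -> dict[str, str]:
--     """Track where each config value came from (for debugging)."""
--     sources: dict[str, str] = {key: "unknown" for key in resolved}
--     for label, layer in (("default", defaults), ("file", file_config), ("environment", env_config)):
--         for key in layer:
--             if key in sources:
--                 sources[key] = label
--     return sources
-- ===== Notes on version B (the rewrite author's own statement) =====
-- stated objective: alternative
-- what changed: Instead of classifying each resolved key by a chain of membership tests, B seeds every resolved key with 'unknown' and then sweeps the three layers in ascending priority (defaults, file, env), overwriting labels so that last-write-wins reproduces the env>file>default precedence; insertion order is fixed by the initial seeding pass.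
import Mathlib
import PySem

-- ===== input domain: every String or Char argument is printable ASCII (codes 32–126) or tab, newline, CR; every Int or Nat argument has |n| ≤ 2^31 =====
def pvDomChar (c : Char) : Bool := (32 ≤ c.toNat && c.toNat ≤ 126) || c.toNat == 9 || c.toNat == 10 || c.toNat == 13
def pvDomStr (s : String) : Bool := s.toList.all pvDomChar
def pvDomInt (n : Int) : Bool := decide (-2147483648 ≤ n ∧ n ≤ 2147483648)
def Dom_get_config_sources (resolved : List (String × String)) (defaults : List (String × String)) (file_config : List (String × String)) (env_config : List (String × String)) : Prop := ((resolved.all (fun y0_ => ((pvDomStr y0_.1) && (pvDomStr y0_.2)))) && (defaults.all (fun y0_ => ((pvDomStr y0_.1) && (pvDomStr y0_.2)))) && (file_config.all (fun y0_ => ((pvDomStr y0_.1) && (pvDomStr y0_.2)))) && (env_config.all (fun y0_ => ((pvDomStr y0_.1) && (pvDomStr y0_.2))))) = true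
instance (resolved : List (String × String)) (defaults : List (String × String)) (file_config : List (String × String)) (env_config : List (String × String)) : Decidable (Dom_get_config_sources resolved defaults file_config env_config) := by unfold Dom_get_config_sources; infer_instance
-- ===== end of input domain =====

-- B re-decomposes A: seed all resolved keys with "unknown", then sweep the layers in
-- ascending priority with last-write-wins overwrites (objective: alternative decomposition).

-- ===== PORT A =====
-- for key in resolved: chain of membership tests, highest priority first
def get_config_sources (resolved : List (String × String)) (defaults : List (String × String)) (file_config : List (String × String)) (env_config : List (String × String)) : List (String × String) :=
  ((resolved.map Prod.fst).foldl
    (fun sources key =>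
      if (env_config.map Prod.fst).contains key then sources.insert key "environment"
      else if (file_config.map Prod.fst).contains key then sources.insert key "file"
      else if (defaults.map Prod.fst).contains key then sources.insert key "default"
      else sources.insert key "unknown")
    (PySem.Dict.empty : PySem.Dict String String)).items

-- ===== PORT B =====
-- sources = {key: "unknown" for key in resolved}; then for each (label, layer) in
-- ascending priority, overwrite sources[key] = label for every layer key present.
def get_config_sources_alt (resolved : List (String × String)) (defaults : List (String × String)) (file_config : List (String × String)) (env_config : List (String × String)) : List (String × String) :=
  let seed : PySem.Dict String String :=
    (resolved.map Prod.fst).foldl (fun sources key => sources.insert key "unknown") PySem.Dict.empty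
  ([("default", defaults), ("file", file_config), ("environment", env_config)].foldl
    (fun sources p =>
      (p.2.map Prod.fst).foldl
        (fun sources key => if sources.contains key then sources.insert key p.1 else sources)
        sources)
    seed).items

-- ===== PRECONDITION & SPEC =====
def Spec_get_config_sources (resolved : List (String × String)) (defaults : List (String × String)) (file_config : List (String × String)) (env_config : List (String × String)) (out : List (String × String)) : Prop := out = get_config_sources_alt resolved defaults file_config env_config
instance (resolved : List (String × String)) (defaults : List (String × String)) (file_config : List (String × String)) (env_config : List (String × String)) (out : List (String × String)) : Decidable (Spec_get_config_sources resolved defaults file_config env_config out) := by unfold Spec_get_config_sources; infer_instance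

-- ===== CLAIM (what is proved, stated in full; the proofs are below) =====
def Claim_equal_get_config_sources : Prop := ∀ (resolved : List (String × String)) (defaults : List (String × String)) (file_config : List (String × String)) (env_config : List (String × String)), Dom_get_config_sources resolved defaults file_config env_config → Spec_get_config_sources resolved defaults file_config env_config (get_config_sources resolved defaults file_config env_config)

-- ===== LEMMAS AND PROOFS =====

-- get? after an unconditional insert loop whose value depends only on the key
theorem pv_get?_foldl_insert_fn (f : String → String) :
    ∀ (K : List String) (d : PySem.Dict String String) (x : String),
      (K.foldl (fun s key => s.insert key (f key)) d).get? x
        = if x ∈ K then some (f x) else d.get? x := by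
  intro K
  induction K with
  | nil => intro d x; simp
  | cons k K ih =>
      intro d x
      rw [List.foldl_cons, ih]
      by_cases hxK : x ∈ K
      · simp [hxK]
      · by_cases hxk : x = k
        · subst hxk; simp [hxK]
        · simp [hxK, hxk, PySem.Dict.get?_insert]

-- keys after an unconditional insert loop
theorem pv_keys_foldl_insert_fn (f : String → String) (K : List String)
    (d : PySem.Dict String String) :
    (K.foldl (fun s key => s.insert key (f key)) d).keys = PySem.Set.update d.keys K :=
  PySem.Dict.keys_foldl_insert K (fun _ key => f key) d

-- keys unchanged by a conditional-overwrite pass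
theorem pv_keys_foldl_cond (v : String) :
    ∀ (L : List String) (d : PySem.Dict String String),
      (L.foldl (fun s key => if s.contains key then s.insert key v else s) d).keys = d.keys := by
  intro L
  induction L with
  | nil => intro d; simp
  | cons k L ih =>
      intro d
      rw [List.foldl_cons, ih]
      by_cases hk : d.contains k
      · simp [hk, PySem.Dict.keys_insert_of_contains _ _ hk]
      · simp [hk]

-- contains unchanged by a conditional-overwrite pass
theorem pv_contains_foldl_cond (v : String) (L : List String)
    (d : PySem.Dict String String) (x : String) :
    (L.foldl (fun s key => if s.contains key then s.insert key v else s) d).contains x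
      = d.contains x := by
  rw [PySem.Dict.contains_eq_decide_mem_keys, PySem.Dict.contains_eq_decide_mem_keys,
    pv_keys_foldl_cond]

-- get? after a conditional-overwrite pass
theorem pv_get?_foldl_cond (v : String) :
    ∀ (L : List String) (d : PySem.Dict String String) (x : String),
      (L.foldl (fun s key => if s.contains key then s.insert key v else s) d).get? x
        = if x ∈ L ∧ d.contains x = true then some v else d.get? x := by
  intro L
  induction L with
  | nil => intro d x; simp
  | cons k L ih =>
      intro d x
      rw [List.foldl_cons]
      by_cases hk : d.contains k
      · simp only [hk, if_pos]
        rw [ih]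
        have hc : (d.insert k v).contains x = d.contains x := by
          by_cases hxk : x = k
          · subst hxk; simp [PySem.Dict.contains_insert_self, hk]
          · rw [PySem.Dict.contains_insert]
            simp [show (x == k) = false by simp [hxk]]
        rw [hc]
        by_cases hxk : x = k
        · subst hxk; simp [hk]
        · by_cases hxL : x ∈ L
          · rw [PySem.Dict.get?_insert]; simp [hxL, hxk]
          · rw [PySem.Dict.get?_insert]; simp [hxL, hxk]
      · simp only [hk, Bool.false_eq_true, if_neg, not_false_iff]
        rw [ih]
        by_cases hxk : x = k
        · subst hxk; simp [hk]
        · simp [hxk]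
      
-- nodup keys of an unconditional insert loop from empty
theorem pv_nodup_keys_fold (f : String → String) (K : List String) :
    ((K.foldl (fun s key => s.insert key (f key)) PySem.Dict.empty).keys).Nodup :=
  PySem.Dict.nodup_keys_foldl_insert K (fun _ key => f key) PySem.Dict.empty
    (by simp [PySem.Dict.keys_empty])

-- ===== VERDICT helper =====
theorem get_config_sources_eq (resolved defaults file_config env_config : List (String × String)) :
    get_config_sources resolved defaults file_config env_config
      = get_config_sources_alt resolved defaults file_config env_config := by
  unfold get_config_sources get_config_sources_alt
  simp only [List.foldl_cons, List.foldl_nil]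
  set K := resolved.map Prod.fst with hK
  set dK := defaults.map Prod.fst with hdK
  set fK := file_config.map Prod.fst with hfK
  set eK := env_config.map Prod.fst with heK
  -- A's loop body inserts key ↦ src key
  have hsrc : (fun (s : PySem.Dict String String) key =>
      if eK.contains key then s.insert key "environment"
      else if fK.contains key then s.insert key "file"
      else if dK.contains key then s.insert key "default"
      else s.insert key "unknown")
    = (fun s key => s.insert key
        (if eK.contains key then "environment"
         else if fK.contains key then "file"
         else if dK.contains key then "default" else "unknown")) := by
    funext s key
    by_cases h1 : key ∈ eK <;> by_cases h2 : key ∈ fK <;>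
      by_cases h3 : key ∈ dK <;> simp [h1, h2, h3]
  rw [hsrc]
  set src : String → String := fun key =>
    (if eK.contains key then "environment"
     else if fK.contains key then "file"
     else if dK.contains key then "default" else "unknown") with hsrcdef
  set dA := K.foldl (fun s key => s.insert key (src key)) PySem.Dict.empty with hdA
  set d0 := K.foldl (fun s key => s.insert key "unknown") PySem.Dict.empty with hd0
  set d1 := dK.foldl (fun s key => if s.contains key then s.insert key "default" else s) d0 with hd1
  set d2 := fK.foldl (fun s key => if s.contains key then s.insert key "file" else s) d1 with hd2
  set d3 := eK.foldl (fun s key => if s.contains key then s.insert key "environment" else s) d2 with hd3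
  -- keys agree
  have hkA : dA.keys = PySem.Set.ofList K := by
    rw [hdA, pv_keys_foldl_insert_fn, PySem.Dict.keys_empty, PySem.Set.update_nil_left]
  have hk0 : d0.keys = PySem.Set.ofList K := by
    rw [hd0, pv_keys_foldl_insert_fn (fun _ => "unknown"), PySem.Dict.keys_empty,
      PySem.Set.update_nil_left]
  have hk3 : d3.keys = PySem.Set.ofList K := by
    rw [hd3, pv_keys_foldl_cond, hd2, pv_keys_foldl_cond, hd1, pv_keys_foldl_cond, hk0]
  have hndA : dA.keys.Nodup := pv_nodup_keys_fold _ _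
  have hnd3 : d3.keys.Nodup := by rw [hk3, ← hkA]; exact hndA
  -- contains of every intermediate dict is membership in K
  have hc0 : ∀ x, d0.contains x = decide (x ∈ K) := by
    intro x
    rw [PySem.Dict.contains_eq_decide_mem_keys, hk0]
    simp [PySem.Set.mem_ofList]
  have hc1 : ∀ x, d1.contains x = decide (x ∈ K) := by
    intro x; rw [hd1, pv_contains_foldl_cond, hc0]
  have hc2 : ∀ x, d2.contains x = decide (x ∈ K) := by
    intro x; rw [hd2, pv_contains_foldl_cond, hc1]
  -- items via keys + lookups
  rw [PySem.Dict.items_eq_map_keys dA hndA "", PySem.Dict.items_eq_map_keys d3 hnd3 "",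
    hkA, hk3]
  refine List.map_congr_left ?_
  intro k hkmem
  have hkK : k ∈ K := (PySem.Set.mem_ofList _ _).mp hkmem
  -- A's lookup
  have hA : dA.getD k "" = src k := by
    rw [PySem.Dict.getD_eq_get?_getD, hdA, pv_get?_foldl_insert_fn src K PySem.Dict.empty k]
    simp [hkK]
  -- B's lookup, pass by pass
  have h0 : d0.get? k = some "unknown" := by
    rw [hd0, pv_get?_foldl_insert_fn (fun _ => "unknown") K PySem.Dict.empty k]
    simp [hkK]
  have hB : d3.getD k "" = src k := by
    rw [PySem.Dict.getD_eq_get?_getD, hd3, pv_get?_foldl_cond, hc2, hd2, pv_get?_foldl_cond,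
      hc1, hd1, pv_get?_foldl_cond, hc0, h0, hsrcdef]
    by_cases h1 : k ∈ eK <;> by_cases h2 : k ∈ fK <;> by_cases h3 : k ∈ dK <;>
      simp [h1, h2, h3, hkK]
  rw [hA, hB]

-- ===== VERDICT (by name: the statement is the Claim_ definition above) =====
theorem get_config_sources_spec : Claim_equal_get_config_sources := by
  intro resolved defaults file_config env_config _
  unfold Spec_get_config_sources
  exact get_config_sources_eq resolved defaults file_config env_config
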